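-- pv_equiv track=rewrite | github.com/yugabyte/yugabyte-db | python/yugabyte/compiler_args.py | get_preprocessor_definition_values
-- ===== SOURCE A (Python) =====
-- from collections import defaultdict
-- from typing import List, DefaultDict, Optional, Any, Tuple, Hashable, Union, Iterable
--
-- def split_preprocessor_definition_flag(arg: str) -> Tuple[str, Optional[str]]:
--     '''
--     >>> split_preprocessor_definition_flag('-DBOOST_BIND_NO_PLACEHOLDERS')
--     ('BOOST_BIND_NO_PLACEHOLDERS', None)
--     >>> split_preprocessor_definition_flag('-DBOOST_BIND_NO_PLACEHOLDERS=1')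
--     ('BOOST_BIND_NO_PLACEHOLDERS', '1')
--     >>> split_preprocessor_definition_flag('-D_GLIBCXX_EXTERN_TEMPLATE=0')
--     ('_GLIBCXX_EXTERN_TEMPLATE', '0')
--     '''
--     assert arg.startswith('-D'), 'Expected a preprocessor definition flag, got %s' % arg
--     split_on_equal = arg[2:].split('=', 1)
--     def_name: Optional[str] = None
--     def_value: Optional[str] = None
--     if len(split_on_equal) == 1:
--         def_name = split_on_equal[0]
--     elif len(split_on_equal) == 2:
--         def_name, def_value = split_on_equal
--     assert def_name is not None
--     return def_name, def_value
--
-- def get_preprocessor_definition_values(args: List[str]) -> DefaultDict[str, List[str]]: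
--     """
--     Given a list of compiler arguments, returns a dictionary mapping preprocessor definitions
--     specified in the command line to their values, in the order they appeared.
--     """
--     name_to_values: DefaultDict[str, List[str]] = defaultdict(list)
--     for arg in args:
--         if arg.startswith('-D'):
--             def_name, def_value = split_preprocessor_definition_flag(arg)
--             if def_value is None:
--                 def_value = '1'
--             if def_value not in name_to_values[def_name]:
--                 name_to_values[def_name].append(def_value)
--     return name_to_values
-- ===== SOURCE B (Python) =====
-- from collections import defaultdict
-- from typing import Optional, Tuple
--
--
-- def split_preprocessor_definition_flag(arg: str) -> Tuple[str, Optional[str]]: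
--     assert arg.startswith('-D'), 'Expected a preprocessor definition flag, got %s' % arg
--     split_on_equal = arg[2:].split('=', 1)
--     if len(split_on_equal) == 1:
--         return split_on_equal[0], None
--     return split_on_equal[0], split_on_equal[1]
--
--
-- def get_preprocessor_definition_values(args):
--     # Pass 1: gather every value (duplicates included) per definition name.
--     name_to_values = defaultdict(list)
--     for arg in args:
--         if arg.startswith('-D'):
--             name, value = split_preprocessor_definition_flag(arg)
--             name_to_values[name].append('1' if value is None else value)
--     # Pass 2: order-preserving dedup of each value list.
--     for name in name_to_values:
--         name_to_values[name] = list(dict.fromkeys(name_to_values[name]))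
--     return name_to_values
-- ===== Notes on version B (the rewrite author's own statement) =====
-- stated objective: alternative
-- what changed: Replaces A's single loop that dedups inline with a per-value membership test by two passes: collect every value (duplicates included) per definition name, then replace each list with its order-preserving dedup via dict.fromkeys.
import Mathlib
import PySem

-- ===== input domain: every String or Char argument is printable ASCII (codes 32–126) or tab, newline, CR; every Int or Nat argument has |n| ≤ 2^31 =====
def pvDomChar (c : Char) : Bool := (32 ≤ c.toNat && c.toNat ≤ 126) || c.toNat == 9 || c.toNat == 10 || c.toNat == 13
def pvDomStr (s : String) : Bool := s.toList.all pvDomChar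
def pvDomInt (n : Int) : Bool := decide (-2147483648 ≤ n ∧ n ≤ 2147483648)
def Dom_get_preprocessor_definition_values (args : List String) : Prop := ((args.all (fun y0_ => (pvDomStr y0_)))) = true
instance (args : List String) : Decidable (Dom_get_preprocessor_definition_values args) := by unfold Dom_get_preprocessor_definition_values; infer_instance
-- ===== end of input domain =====

-- B replaces A's single loop with inline membership dedup by two differently-shaped passes
-- (collect all values per name, then dedup each list via dict.fromkeys); objective: alternative decomposition.

-- ===== PORT A =====
-- shared module helper: split_preprocessor_definition_flag (the '-D' prefix is guaranteed by the caller's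
-- startswith check, so the assert never fires; arg[2:].split('=', 1) yields one or two pieces — the
-- wildcard branch below is unreachable)
def split_preprocessor_definition_flag (arg : String) : String × Option String :=
  match PySem.Str.splitMax? (String.ofList (PySem.List.slice arg.toList (some 2) none)) "=" 1 with
  | some [n] => (n, none)
  | some [n, v] => (n, some v)
  | _ => ("", none)

def get_preprocessor_definition_values (args : List String) : List (String × List String) :=
  (args.foldl (fun d arg =>
    if PySem.Str.startswith arg "-D" then
      let p := split_preprocessor_definition_flag arg
      let v := p.2.getD "1"
      let cur := d.getD p.1 []          -- defaultdict access materializes the key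
      if v ∈ cur then d.insert p.1 cur else d.insert p.1 (cur ++ [v])
    else d) PySem.Dict.empty).items

-- ===== PORT B =====
def get_preprocessor_definition_values_alt (args : List String) : List (String × List String) :=
  let d := args.foldl (fun d arg =>
    if PySem.Str.startswith arg "-D" then
      let p := split_preprocessor_definition_flag arg
      d.insert p.1 (d.getD p.1 [] ++ [p.2.getD "1"])
    else d) PySem.Dict.empty
  d.items.map (fun q => (q.1, PySem.List.dedup q.2))

-- ===== PRECONDITION & SPEC =====
def Spec_get_preprocessor_definition_values (args : List String) (out : List (String × List String)) : Prop := out = get_preprocessor_definition_values_alt args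
instance (args : List String) (out : List (String × List String)) : Decidable (Spec_get_preprocessor_definition_values args out) := by unfold Spec_get_preprocessor_definition_values; infer_instance

-- ===== CLAIM (what is proved, stated in full; the proofs are below) =====
def Claim_equal_get_preprocessor_definition_values : Prop := ∀ (args : List String), Dom_get_preprocessor_definition_values args → Spec_get_preprocessor_definition_values args (get_preprocessor_definition_values args)

-- ===== LEMMAS AND PROOFS =====

-- map-the-values functor on dicts used by the invariant
def pvMapDedup (d : PySem.Dict String (List String)) : PySem.Dict String (List String) :=
  PySem.Dict.mk (d.items.map (fun q => (q.1, PySem.List.dedup q.2)))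

lemma pvMapDedup_get? (d : PySem.Dict String (List String)) (k : String) :
    (pvMapDedup d).get? k = (d.get? k).map PySem.List.dedup := by
  obtain ⟨l⟩ := d
  induction l with
  | nil => rfl
  | cons p rest ih =>
    obtain ⟨a, b⟩ := p
    simp only [pvMapDedup, List.map_cons, PySem.Dict.get?_mk_cons] at *
    split_ifs with h
    · rfl
    · exact ih

lemma pvMapDedup_getD (d : PySem.Dict String (List String)) (k : String) :
    (pvMapDedup d).getD k [] = PySem.List.dedup (d.getD k []) := by
  rw [PySem.Dict.getD_eq_get?_getD, PySem.Dict.getD_eq_get?_getD, pvMapDedup_get?]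
  cases d.get? k <;> rfl

lemma pvMapDedup_contains (d : PySem.Dict String (List String)) (k : String) :
    (pvMapDedup d).contains k = d.contains k := by
  rw [PySem.Dict.contains_eq_isSome_get?, PySem.Dict.contains_eq_isSome_get?, pvMapDedup_get?]
  cases d.get? k <;> rfl

lemma pvDedup_append (xs : List String) (v : String) :
    PySem.List.dedup (xs ++ [v]) =
      if v ∈ PySem.List.dedup xs then PySem.List.dedup xs else PySem.List.dedup xs ++ [v] := by
  simp only [PySem.List.dedup_eq_ofList, PySem.Set.ofList_append_singleton]
  exact PySem.Set.add_eq_ite _ v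

lemma pvMapDedup_insert (d : PySem.Dict String (List String)) (n : String) (xs : List String) :
    pvMapDedup (d.insert n xs) = (pvMapDedup d).insert n (PySem.List.dedup xs) := by
  apply PySem.Dict.ext
  show (d.insert n xs).items.map _ = ((pvMapDedup d).insert n (PySem.List.dedup xs)).items
  rw [PySem.Dict.items_insert, PySem.Dict.items_insert, pvMapDedup_contains]
  split_ifs with h
  · show _ = List.map _ (d.items.map _)
    rw [List.map_map, List.map_map]
    apply List.map_congr_left
    intro q _
    by_cases hq : q.1 = n <;> simp [hq]
  · simp [pvMapDedup]

lemma pvMain (args : List String) : ∀ (d : PySem.Dict String (List String)),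
    (args.foldl (fun d arg =>
      if PySem.Str.startswith arg "-D" then
        let p := split_preprocessor_definition_flag arg
        let v := p.2.getD "1"
        let cur := d.getD p.1 []
        if v ∈ cur then d.insert p.1 cur else d.insert p.1 (cur ++ [v])
      else d) (pvMapDedup d)).items =
    ((args.foldl (fun d arg =>
      if PySem.Str.startswith arg "-D" then
        let p := split_preprocessor_definition_flag arg
        d.insert p.1 (d.getD p.1 [] ++ [p.2.getD "1"])
      else d) d).items).map (fun q => (q.1, PySem.List.dedup q.2)) := by
  induction args with
  | nil => intro d; rfl
  | cons arg args ih =>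
    intro d
    simp only [List.foldl_cons]
    by_cases hs : PySem.Str.startswith arg "-D"
    · simp only [hs, if_true]
      set p := split_preprocessor_definition_flag arg with hp
      have hstep :
          (let v := p.2.getD "1";
           let cur := (pvMapDedup d).getD p.1 [];
           if v ∈ cur then (pvMapDedup d).insert p.1 cur
           else (pvMapDedup d).insert p.1 (cur ++ [v])) =
          pvMapDedup (d.insert p.1 (d.getD p.1 [] ++ [p.2.getD "1"])) := by
        rw [pvMapDedup_insert, pvDedup_append, pvMapDedup_getD]
        exact (apply_ite ((pvMapDedup d).insert p.1) _ _ _).symm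
      rw [hstep]
      exact ih _
    · simp only [hs]
      exact ih d

-- ===== VERDICT (by name: the statement is the Claim_ definition above) =====
theorem get_preprocessor_definition_values_spec : Claim_equal_get_preprocessor_definition_values := by
  intro args _
  unfold Spec_get_preprocessor_definition_values
  unfold get_preprocessor_definition_values get_preprocessor_definition_values_alt
  have h := pvMain args PySem.Dict.empty
  simpa using h
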